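-- pv_equiv track=rewrite | github.com/jeff-donovan/aoc-2024 | day_21/part2.py | group_by_A
-- ===== SOURCE A (Python) =====
-- def group_by_A(seq):
--     a_indices = [i for i, char in enumerate(seq) if char == 'A']
--     new_sequences = []
--     start = 0
--     for a_index in a_indices:
--         new_sequences.append(seq[start : a_index + 1])
--         start = a_index + 1
--     return new_sequences
-- ===== SOURCE B (Python) =====
-- def group_by_A(seq):
--     result = []
--     cur = ''
--     for ch in seq:
--         cur += ch
--         if ch == 'A':
--             result.append(cur)
--             cur = ''
--     return result
-- ===== Notes on version B (the rewrite author's own statement) =====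
-- stated objective: simpler
-- what changed: Replaced the two-phase scheme (collect all 'A' indices, then loop over them slicing the sequence) with a single pass that accumulates the current chunk and emits it whenever an 'A' is seen.
import Mathlib
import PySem

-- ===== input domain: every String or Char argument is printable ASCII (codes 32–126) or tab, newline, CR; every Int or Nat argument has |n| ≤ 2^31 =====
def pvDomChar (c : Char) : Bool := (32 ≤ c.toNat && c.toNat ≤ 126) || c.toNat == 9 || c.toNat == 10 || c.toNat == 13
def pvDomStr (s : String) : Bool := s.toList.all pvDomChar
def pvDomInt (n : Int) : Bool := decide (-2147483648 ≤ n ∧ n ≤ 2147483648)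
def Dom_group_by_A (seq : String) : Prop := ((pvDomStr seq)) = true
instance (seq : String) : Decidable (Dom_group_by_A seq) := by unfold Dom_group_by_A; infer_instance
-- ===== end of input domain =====

-- B replaces A's two-phase 'collect all A-indices, then slice between them' with a single
-- accumulating pass that emits the current chunk whenever an 'A' is seen (simpler).

-- ===== PORT A =====
-- loop body of A's 'for a_index in a_indices' (state = (new_sequences, start))
def aStep (seq : String) (st : List String × Int) (a_index : Int) : List String × Int :=
  (st.1 ++ [PySem.Str.slice seq (some st.2) (some (a_index + 1))], a_index + 1)

def group_by_A (seq : String) : List String :=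
  let a_indices : List Int :=
    ((PySem.List.enumerate seq.toList 0).filter (fun p => p.2 == 'A')).map (·.1)
  (a_indices.foldl (aStep seq) ([], 0)).1

-- ===== PORT B =====
-- loop body of B's single pass (state = (result, cur))
def altStep (st : List String × List Char) (ch : Char) : List String × List Char :=
  let cur := st.2 ++ [ch]
  if ch == 'A' then (st.1 ++ [String.ofList cur], []) else (st.1, cur)

def group_by_A_alt (seq : String) : List String :=
  (seq.toList.foldl altStep ([], [])).1

-- ===== PRECONDITION & SPEC =====
def Spec_group_by_A (seq : String) (out : List String) : Prop := out = group_by_A_alt seq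
instance (seq : String) (out : List String) : Decidable (Spec_group_by_A seq out) := by unfold Spec_group_by_A; infer_instance

-- ===== CLAIM (what is proved, stated in full; the proofs are below) =====
def Claim_equal_group_by_A : Prop := ∀ (seq : String), Dom_group_by_A seq → Spec_group_by_A seq (group_by_A seq)

-- ===== LEMMAS AND PROOFS =====

/-- Reference chunking: chunks of `cs` ending at `'A'`, with `acc` the pending prefix. -/
def chunksA : List Char → List Char → List String
  | _, [] => []
  | acc, c :: cs =>
    if c = 'A' then String.ofList (acc ++ [c]) :: chunksA [] cs else chunksA (acc ++ [c]) cs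

theorem alt_fold (cs : List Char) : ∀ (res : List String) (acc : List Char),
    (cs.foldl altStep (res, acc)).1 = res ++ chunksA acc cs := by
  induction cs with
  | nil => intro res acc; simp [chunksA]
  | cons c cs ih =>
    intro res acc
    rw [List.foldl_cons]
    by_cases hc : c = 'A'
    · simp only [altStep, hc, if_pos rfl, beq_self_eq_true, if_true]
      rw [ih]
      simp [chunksA]
    · simp only [altStep, if_neg (by simpa using hc)]
      rw [ih]
      simp [chunksA, hc]

/-- The indices A collects, as a function of the suffix and its starting offset. -/
def idxsA (cs : List Char) (s : Int) : List Int :=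
  ((PySem.List.enumerate cs s).filter (fun p => p.2 == 'A')).map (·.1)

theorem idxsA_cons (c : Char) (cs : List Char) (s : Int) :
    idxsA (c :: cs) s = if c = 'A' then s :: idxsA cs (s + 1) else idxsA cs (s + 1) := by
  by_cases hc : c = 'A' <;> simp [idxsA, PySem.List.enumerate_cons, hc]

theorem a_fold (seq : String) : ∀ (cs : List Char) (s start : ℕ) (res : List String),
    start ≤ s → seq.toList.drop s = cs →
    ((idxsA cs s).foldl (aStep seq) (res, (start : Int))).1
    = res ++ chunksA ((seq.toList.drop start).take (s - start)) cs := by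
  intro cs
  induction cs with
  | nil => intro s start res _ _; simp [idxsA, chunksA]
  | cons c cs ih =>
    intro s start res hss hdrop
    have hs : s < seq.toList.length := by
      by_contra h
      push_neg at h
      rw [List.drop_eq_nil_of_le h] at hdrop
      exact List.cons_ne_nil _ _ hdrop.symm
    have hget : seq.toList[s]? = some c := by
      have h0 : (seq.toList.drop s)[0]? = seq.toList[s + 0]? := List.getElem?_drop ..
      simpa [hdrop] using h0.symm
    have hdrop' : seq.toList.drop (s + 1) = cs := by
      have : (seq.toList.drop s).drop 1 = cs := by rw [hdrop]; rfl
      simpa [List.drop_drop, Nat.add_comm] using this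
    have hseg : ∀ t : ℕ, t ≤ s →
        (seq.toList.drop t).take (s + 1 - t) = (seq.toList.drop t).take (s - t) ++ [c] := by
      intro t ht
      have hv : (seq.toList.drop t)[s - t]? = some c := by
        rw [List.getElem?_drop, show t + (s - t) = s from by omega, hget]
      rw [show s + 1 - t = (s - t) + 1 from by omega, List.take_add_one, hv]
      rfl
    rw [idxsA_cons]
    by_cases hc : c = 'A'
    · simp only [hc, if_true]
      rw [List.foldl_cons]
      have hslice : PySem.Str.slice seq (some (start : Int)) (some ((s : Int) + 1))
          = String.ofList ((seq.toList.drop start).take (s - start) ++ ['A']) := by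
        apply String.toList_injective
        rw [PySem.Str.toList_slice, PySem.Chars.slice_eq_listSlice,
          show ((s : Int) + 1) = ((s + 1 : ℕ) : Int) from by push_cast; ring,
          PySem.List.slice_natCast, hseg start hss]
        simp [hc]
      show ((idxsA cs ((s : Int) + 1)).foldl (aStep seq)
          (res ++ [PySem.Str.slice seq (some (start : Int)) (some ((s : Int) + 1))],
            (s : Int) + 1)).1 = _
      rw [hslice, show ((s : Int) + 1) = (((s + 1 : ℕ)) : Int) from by push_cast; ring,
        ih (s + 1) (s + 1) _ (le_refl _) hdrop']
      simp [chunksA, hc]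
    · simp only [hc, if_false]
      rw [show ((s : Int) + 1) = (((s + 1 : ℕ)) : Int) from by push_cast; ring,
        ih (s + 1) start _ (by omega) hdrop', hseg start hss]
      simp [chunksA, hc]

-- ===== VERDICT (by name: the statement is the Claim_ definition above) =====
theorem group_by_A_spec : Claim_equal_group_by_A := by
  intro seq _
  unfold Spec_group_by_A group_by_A group_by_A_alt
  rw [alt_fold]
  have := a_fold seq seq.toList 0 0 [] (le_refl _) (by simp)
  simpa [idxsA] using this
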